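-- pv_equiv track=rewrite | github.com/MariaFariss/ips_astre | IPS_ASTRE_Back/wasakh.py | transform_to_data_structure
-- ===== SOURCE A (Python) =====
-- def transform_to_data_structure(data):
--     scores = {}
--
--     ips_keywords = {
--         ("UX/UI", "Option 1"): 3,
--         ("VR/AR", "ENSIMERSION"): 3,
--         ("Frontend/Backend", "JavaScript, HTML, CSS"): 3,
--         ("Python", "Intelligence Artficielle"): 1,
--         ("UX/UI", "L’esthétique"): 4,
--     }
--
--     astre_keywords = {
--         ("Domotique", "Robotique", "C++"): -4,
--         ("C++", "Arduino"): -3,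
--         ("MAO", "Option 2"): -1,
--         ("Robotique", "Vim"): -1,
--         ("NetBeans", "C++"): -3
--     }
--
--     for row in data:
--         student_id = row[1]
--         score = 0
--         for response in row[2:]:
--             for key, value in ips_keywords.items():
--                 if response in key:
--                     score += value
--             for key, value in astre_keywords.items():
--                 if response in key:
--                     score += value
--         label = "IPS" if score > 0 else "ASTRE"
--         scores[student_id] = (label, score)
--
--     return scores
-- ===== SOURCE B (Python) =====
-- def transform_to_data_structure(data):
--     ips_keywords = {
--         ("UX/UI", "Option 1"): 3,
--         ("VR/AR", "ENSIMERSION"): 3,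
--         ("Frontend/Backend", "JavaScript, HTML, CSS"): 3,
--         ("Python", "Intelligence Artficielle"): 1,
--         ("UX/UI", "L’esthétique"): 4,
--     }
--
--     astre_keywords = {
--         ("Domotique", "Robotique", "C++"): -4,
--         ("C++", "Arduino"): -3,
--         ("MAO", "Option 2"): -1,
--         ("Robotique", "Vim"): -1,
--         ("NetBeans", "C++"): -3
--     }
--
--     # flatten both keyword tables once: each token maps to the SUM of the
--     # values of every tuple it occurs in (e.g. "C++" -> -10, "UX/UI" -> 7)
--     weights = {}
--     for key, value in list(ips_keywords.items()) + list(astre_keywords.items()):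
--         for token in key:
--             weights[token] = weights.get(token, 0) + value
--
--     scores = {}
--     for row in data:
--         student_id = row[1]
--         score = sum(weights.get(r, 0) for r in row[2:])
--         scores[student_id] = ("IPS" if score > 0 else "ASTRE", score)
--     return scores
-- ===== Notes on version B (the rewrite author's own statement) =====
-- stated objective: simpler
-- what changed: The two inner loops over the keyword dicts are replaced by a single flat token->weight dict precomputed once (summing values of tokens shared between tuples), so each response is scored by one lookup instead of ten tuple-membership tests.
import Mathlib
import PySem

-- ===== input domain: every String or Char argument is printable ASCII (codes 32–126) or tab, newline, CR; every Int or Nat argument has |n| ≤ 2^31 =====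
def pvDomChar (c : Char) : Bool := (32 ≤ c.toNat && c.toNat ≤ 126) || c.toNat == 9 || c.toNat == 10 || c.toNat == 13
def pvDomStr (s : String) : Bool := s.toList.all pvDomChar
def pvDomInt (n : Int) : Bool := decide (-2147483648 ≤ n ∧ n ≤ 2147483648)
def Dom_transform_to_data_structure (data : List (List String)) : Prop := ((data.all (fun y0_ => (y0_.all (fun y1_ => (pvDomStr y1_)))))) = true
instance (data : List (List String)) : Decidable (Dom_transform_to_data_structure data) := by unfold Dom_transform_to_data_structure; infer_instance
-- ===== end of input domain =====

-- ===== PORT A =====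
-- B replaces the two inner keyword-dict scans per response by one lookup in a
-- flat token->weight dict precomputed once (objective: simpler).

-- the two keyword dicts of A, as (tuple-of-tokens, value) lists in source order
def pvIps : List (List String × Int) :=
  [ (["UX/UI", "Option 1"], 3),
    (["VR/AR", "ENSIMERSION"], 3),
    (["Frontend/Backend", "JavaScript, HTML, CSS"], 3),
    (["Python", "Intelligence Artficielle"], 1),
    (["UX/UI", "L’esthétique"], 4) ]

def pvAstre : List (List String × Int) :=
  [ (["Domotique", "Robotique", "C++"], -4),
    (["C++", "Arduino"], -3),
    (["MAO", "Option 2"], -1),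
    (["Robotique", "Vim"], -1),
    (["NetBeans", "C++"], -3) ]

def transform_to_data_structure (data : List (List String)) : List (String × String × Int) :=
  (data.foldl (fun (scores : PySem.Dict String (String × Int)) row =>
    match PySem.List.pyGet? row 1 with    -- row[1]; none (IndexError) is excluded by Pre_
    | none => scores
    | some student_id =>
      let score := (PySem.List.slice row (some 2) none).foldl (fun score response =>
        let score := pvIps.foldl
          (fun score kv => if kv.1.contains response then score + kv.2 else score) score
        pvAstre.foldl
          (fun score kv => if kv.1.contains response then score + kv.2 else score) score) 0
      scores.insert student_id ((if score > 0 then "IPS" else "ASTRE"), score))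
    PySem.Dict.empty).items

-- ===== PORT B =====
-- flat dict: weights[token] = weights.get(token, 0) + value, over both dicts' items
def pvWeights : PySem.Dict String Int :=
  (pvIps ++ pvAstre).foldl
    (fun w kv => kv.1.foldl (fun w token => w.insert token (w.getD token 0 + kv.2)) w)
    PySem.Dict.empty

def transform_to_data_structure_alt (data : List (List String)) : List (String × String × Int) :=
  (data.foldl (fun (scores : PySem.Dict String (String × Int)) row =>
    match PySem.List.pyGet? row 1 with    -- row[1]; none (IndexError) is excluded by Pre_
    | none => scores
    | some student_id =>
      let score := ((PySem.List.slice row (some 2) none).map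
        (fun r => pvWeights.getD r 0)).sum
      scores.insert student_id ((if score > 0 then "IPS" else "ASTRE"), score))
    PySem.Dict.empty).items

-- ===== PRECONDITION & SPEC =====
-- A (and B) read row[1]: a row with fewer than 2 entries raises IndexError.
def Pre_transform_to_data_structure (data : List (List String)) : Prop :=
  ∀ row ∈ data, 2 ≤ row.length
instance (data : List (List String)) : Decidable (Pre_transform_to_data_structure data) := by
  unfold Pre_transform_to_data_structure; infer_instance
def pvWitness_transform_to_data_structure : List (List String) :=
  [["ts", "s1", "C++", "UX/UI"], ["ts", "s2", "Python"]]
def Spec_transform_to_data_structure (data : List (List String)) (out : List (String × String × Int)) : Prop := out = transform_to_data_structure_alt data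
instance (data : List (List String)) (out : List (String × String × Int)) : Decidable (Spec_transform_to_data_structure data out) := by unfold Spec_transform_to_data_structure; infer_instance

-- ===== CLAIM (what is proved, stated in full; the proofs are below) =====
def Claim_equal_transform_to_data_structure : Prop := ∀ (data : List (List String)), Dom_transform_to_data_structure data → Pre_transform_to_data_structure data → Spec_transform_to_data_structure data (transform_to_data_structure data)

-- ===== LEMMAS AND PROOFS =====

-- A's per-response contribution, started from 0
def pvContrib (r : String) : Int :=
  pvAstre.foldl (fun score kv => if kv.1.contains r then score + kv.2 else score)
    (pvIps.foldl (fun score kv => if kv.1.contains r then score + kv.2 else score) 0)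

lemma pvKwFold_shift (l : List (List String × Int)) (r : String) (s : Int) :
    l.foldl (fun score kv => if kv.1.contains r then score + kv.2 else score) s
      = s + l.foldl (fun score kv => if kv.1.contains r then score + kv.2 else score) 0 := by
  have h : (fun (score : Int) (kv : List String × Int) =>
      if kv.1.contains r then score + kv.2 else score)
      = fun score kv => score + (if kv.1.contains r then kv.2 else 0) := by
    funext score kv; split_ifs <;> simp
  rw [h, PySem.List.foldl_add, PySem.List.foldl_add]; simp

lemma pvContrib_eq (r : String) : pvContrib r = pvWeights.getD r 0 := by
  by_cases h1 : r = "UX/UI"; · subst h1; decide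
  by_cases h2 : r = "Option 1"; · subst h2; decide
  by_cases h3 : r = "VR/AR"; · subst h3; decide
  by_cases h4 : r = "ENSIMERSION"; · subst h4; decide
  by_cases h5 : r = "Frontend/Backend"; · subst h5; decide
  by_cases h6 : r = "JavaScript, HTML, CSS"; · subst h6; decide
  by_cases h7 : r = "Python"; · subst h7; decide
  by_cases h8 : r = "Intelligence Artficielle"; · subst h8; decide
  by_cases h9 : r = "L’esthétique"; · subst h9; decide
  by_cases h10 : r = "Domotique"; · subst h10; decide
  by_cases h11 : r = "Robotique"; · subst h11; decide
  by_cases h12 : r = "C++"; · subst h12; decide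
  by_cases h13 : r = "Arduino"; · subst h13; decide
  by_cases h14 : r = "MAO"; · subst h14; decide
  by_cases h15 : r = "Option 2"; · subst h15; decide
  by_cases h16 : r = "Vim"; · subst h16; decide
  by_cases h17 : r = "NetBeans"; · subst h17; decide
  have hw : pvWeights = PySem.Dict.mk
      [("UX/UI", 7), ("Option 1", 3), ("VR/AR", 3), ("ENSIMERSION", 3),
       ("Frontend/Backend", 3), ("JavaScript, HTML, CSS", 3), ("Python", 1),
       ("Intelligence Artficielle", 1), ("L’esthétique", 4), ("Domotique", -4),
       ("Robotique", -5), ("C++", -10), ("Arduino", -3), ("MAO", -1),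
       ("Option 2", -1), ("Vim", -1), ("NetBeans", -3)] := by decide
  simp [pvContrib, pvIps, pvAstre, List.foldl, hw, PySem.Dict.getD_eq_get?_getD,
    List.contains_eq_mem,
    h1, h2, h3, h4, h5, h6, h7, h8, h9, h10, h11, h12, h13, h14, h15, h16, h17,
    Ne.symm h1, Ne.symm h2, Ne.symm h3, Ne.symm h4, Ne.symm h5, Ne.symm h6,
    Ne.symm h7, Ne.symm h8, Ne.symm h9, Ne.symm h10, Ne.symm h11, Ne.symm h12,
    Ne.symm h13, Ne.symm h14, Ne.symm h15, Ne.symm h16, Ne.symm h17,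
    PySem.Dict.get?]

lemma pvScore_eq (l : List String) (s : Int) :
    l.foldl (fun score response =>
        pvAstre.foldl (fun score kv => if kv.1.contains response then score + kv.2 else score)
          (pvIps.foldl (fun score kv => if kv.1.contains response then score + kv.2 else score)
            score)) s
      = s + (l.map (fun r => pvWeights.getD r 0)).sum := by
  induction l generalizing s with
  | nil => simp
  | cons x t ih =>
    simp only [List.foldl_cons, List.map_cons, List.sum_cons, ih]
    rw [pvKwFold_shift pvAstre, pvKwFold_shift pvIps]
    have := pvContrib_eq x
    simp only [pvContrib] at this
    rw [pvKwFold_shift pvAstre] at this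
    omega

lemma pvLoop_eq (data : List (List String)) (d : PySem.Dict String (String × Int)) :
    data.foldl (fun (scores : PySem.Dict String (String × Int)) row =>
      match PySem.List.pyGet? row 1 with
      | none => scores
      | some student_id =>
        let score := (PySem.List.slice row (some 2) none).foldl (fun score response =>
          let score := pvIps.foldl
            (fun score kv => if kv.1.contains response then score + kv.2 else score) score
          pvAstre.foldl
            (fun score kv => if kv.1.contains response then score + kv.2 else score) score) 0
        scores.insert student_id ((if score > 0 then "IPS" else "ASTRE"), score)) d
    = data.foldl (fun (scores : PySem.Dict String (String × Int)) row =>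
      match PySem.List.pyGet? row 1 with
      | none => scores
      | some student_id =>
        let score := ((PySem.List.slice row (some 2) none).map
          (fun r => pvWeights.getD r 0)).sum
        scores.insert student_id ((if score > 0 then "IPS" else "ASTRE"), score)) d := by
  induction data generalizing d with
  | nil => rfl
  | cons row t ih =>
    simp only [List.foldl_cons]
    rw [ih]
    congr 1
    cases hr : PySem.List.pyGet? row 1 with
    | none => rfl
    | some sid =>
      simp only []
      have := pvScore_eq (PySem.List.slice row (some 2) none) 0
      simp only [zero_add] at this
      rw [this]

-- ===== VERDICT (by name: the statement is the Claim_ definition above) =====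
theorem transform_to_data_structure_spec : Claim_equal_transform_to_data_structure := by
  intro data _ _
  unfold Spec_transform_to_data_structure transform_to_data_structure transform_to_data_structure_alt
  rw [pvLoop_eq]
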